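-- pv_equiv track=rewrite | github.com/hjbauer/hexTacToe | backend/game/hex_coord.py | legal_placement_zone
-- ===== SOURCE A (Python) =====
-- from typing import Iterable
--
-- Coord = tuple[int, int]
--
-- HEX_DIRECTIONS: tuple[Coord, ...] = (
--     (1, 0),
--     (1, -1),
--     (0, -1),
--     (-1, 0),
--     (-1, 1),
--     (0, 1),
-- )
--
-- def ring(center_q: int, center_r: int, radius: int) -> set[Coord]:
--     if radius == 0:
--         return {(center_q, center_r)}
--     results: set[Coord] = set()
--     q = center_q + HEX_DIRECTIONS[4][0] * radius
--     r = center_r + HEX_DIRECTIONS[4][1] * radius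
--     for direction in HEX_DIRECTIONS:
--         dq, dr = direction
--         for _ in range(radius):
--             results.add((q, r))
--             q += dq
--             r += dr
--     return results
--
-- def neighbors(center_q: int, center_r: int, radius: int = 1) -> set[Coord]:
--     results: set[Coord] = set()
--     for current_radius in range(radius + 1):
--         results.update(ring(center_q, center_r, current_radius))
--     return results
--
-- def legal_placement_zone(all_hexes: Iterable[Coord], is_first_move: bool) -> set[Coord]:
--     occupied = set(all_hexes)
--     if is_first_move:
--         return neighbors(0, 0, radius=8) - occupied
--
--     zone: set[Coord] = set()
--     for q, r in occupied:
--         zone.update(neighbors(q, r, radius=8))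
--     return zone - occupied
-- ===== SOURCE B (Python) =====
-- from math import isqrt
--
-- _DIRS = ((1, 0), (1, -1), (0, -1), (-1, 0), (-1, 1), (0, 1))
-- _CORNERS = ((-1, 1), (0, 1), (1, 0), (1, -1), (0, -1), (-1, 0))
--
-- def _cell(i):
--     if i == 0:
--         return (0, 0)
--     k = (3 + isqrt(12 * i - 3)) // 6
--     s, t = divmod(i - (3 * k * (k - 1) + 1), k)
--     return (k * _CORNERS[s][0] + t * _DIRS[s][0], k * _CORNERS[s][1] + t * _DIRS[s][1])
--
-- _RINGS = [[(0, 0)]] + [[_cell(i) for i in range(3 * k * (k - 1) + 1, 3 * k * (k + 1) + 1)]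
--                        for k in range(1, 9)]
--
-- def _disk(q, r):
--     return set().union(*({(q + dq, r + dr) for dq, dr in ring} for ring in _RINGS))
--
-- def legal_placement_zone(all_hexes, is_first_move):
--     occupied = set(all_hexes)
--     if is_first_move:
--         return _disk(0, 0) - occupied
--     return set().union(*(_disk(q, r) for q, r in occupied)) - occupied
--
-- # Note: the per-ring set grouping and the in-ring (walk) enumeration order are kept on purpose:
-- # a Python set's iteration order depends on its build history, so this keeps the returned set
-- # observably identical to A's, while the cells themselves come from the closed-form index map
-- # _cell (ring from isqrt, side/step from divmod) instead of A's stateful cursor walk.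
-- ===== Notes on version B (the rewrite author's own statement) =====
-- stated objective: alternative
-- what changed: B discards A's stateful ring-walking (a mutable (q, r) cursor stepped through the six hex directions, radius times each, inside three nested loops per occupied cell and per ring) in favour of a closed-form index->cell map: cell i of the 217-cell spiral is obtained directly as k*corner(side) + step*dir(side) with the ring k inverted from i by an integer square root, the nine ring templates are built once at module load from that map, and the function itself is two pure set expressions (union of translated templates, minus occupied) with no loops or mutation; …
import Mathlib
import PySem

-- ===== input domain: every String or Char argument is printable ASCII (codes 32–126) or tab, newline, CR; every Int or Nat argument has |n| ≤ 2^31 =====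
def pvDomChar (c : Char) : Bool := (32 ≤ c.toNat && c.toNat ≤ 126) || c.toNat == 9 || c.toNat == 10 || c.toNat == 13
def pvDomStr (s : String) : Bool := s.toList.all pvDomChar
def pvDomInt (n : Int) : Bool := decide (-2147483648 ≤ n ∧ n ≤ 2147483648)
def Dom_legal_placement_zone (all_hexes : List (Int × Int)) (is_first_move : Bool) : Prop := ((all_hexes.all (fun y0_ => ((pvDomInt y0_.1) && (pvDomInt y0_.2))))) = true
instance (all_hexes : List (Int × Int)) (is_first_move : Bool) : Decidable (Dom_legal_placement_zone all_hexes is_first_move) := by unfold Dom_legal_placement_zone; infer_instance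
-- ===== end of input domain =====

-- B replaces A's stateful ring-walking by a closed-form index->cell map (ring from an integer square
-- root, side/step from divmod), ring templates built once, and a loop-free declarative function body;
-- the set build order is kept equal to A's, so the returned set is observably identical (alternative).

-- ===== PORT A =====
def HEX_DIRECTIONS : List (Int × Int) := [(1,0),(1,-1),(0,-1),(-1,0),(-1,1),(0,1)]

def ring (center_q center_r radius : Int) : PySem.Set (Int × Int) :=
  if radius == 0 then PySem.Set.ofList [(center_q, center_r)]
  else
    let d4 := PySem.List.pyGetD HEX_DIRECTIONS 4 (0,0)
    let st := HEX_DIRECTIONS.foldl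
      (fun (st : PySem.Set (Int × Int) × Int × Int) dir =>
        (PySem.List.pyRange 0 radius 1).foldl
          (fun st _ =>
            (PySem.Set.add st.1 (st.2.1, st.2.2), st.2.1 + dir.1, st.2.2 + dir.2)) st)
      (PySem.Set.empty, center_q + d4.1 * radius, center_r + d4.2 * radius)
    st.1

def neighbors (center_q center_r radius : Int) : PySem.Set (Int × Int) :=
  (PySem.List.pyRange 0 (radius + 1) 1).foldl
    (fun results current_radius => PySem.Set.update results (ring center_q center_r current_radius))
    PySem.Set.empty

def legal_placement_zone (all_hexes : List (Int × Int)) (is_first_move : Bool) : List (Int × Int) :=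
  let occupied := PySem.Set.ofList all_hexes
  if is_first_move then
    PySem.Set.diff (neighbors 0 0 8) occupied
  else
    let zone := occupied.foldl
      (fun zone qr => PySem.Set.update zone (neighbors qr.1 qr.2 8)) PySem.Set.empty
    PySem.Set.diff zone occupied

-- ===== PORT B =====
def pvDirs : List (Int × Int) := [(1,0),(1,-1),(0,-1),(-1,0),(-1,1),(0,1)]
def pvCorners : List (Int × Int) := [(-1,1),(0,1),(1,0),(1,-1),(0,-1),(-1,0)]

-- hand port of math.isqrt (PySem has no isqrt): digit-by-digit recursion on a structural fuel;
-- exact (= floor of the square root) for every Nat n with fuel ≥ n, and B calls it as pvIsqrt n.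
def pvIsqrtAux : Nat → Nat → Nat
  | 0, n => n
  | fuel + 1, n =>
      if n < 2 then n
      else
        let r := 2 * pvIsqrtAux fuel (n / 4)
        if (r + 1) * (r + 1) ≤ n then r + 1 else r

def pvIsqrt (n : Nat) : Nat := pvIsqrtAux n n

-- closed-form cell i of the 217-cell spiral ('_cell' in Source B; Python's isqrt is called on 12*i-3 > 0)
def pvCell (i : Int) : Int × Int :=
  if i == 0 then (0, 0)
  else
    let k : Int := PySem.Int.floordiv (3 + Int.ofNat (pvIsqrt (12 * i - 3).toNat)) 6
    let s := PySem.Int.floordiv (i - (3 * k * (k - 1) + 1)) k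
    let t := PySem.Int.mod (i - (3 * k * (k - 1) + 1)) k
    let c := PySem.List.pyGetD pvCorners s (0,0)
    let d := PySem.List.pyGetD pvDirs s (0,0)
    (k * c.1 + t * d.1, k * c.2 + t * d.2)

def pvRings : List (List (Int × Int)) :=
  [[(0, 0)]] ++ (PySem.List.pyRange 1 9 1).map (fun k =>
    (PySem.List.pyRange (3 * k * (k - 1) + 1) (3 * k * (k + 1) + 1) 1).map pvCell)

def pvDisk (q r : Int) : PySem.Set (Int × Int) :=
  pvRings.foldl
    (fun cells ring =>
      PySem.Set.update cells (PySem.Set.ofList (ring.map (fun d => (q + d.1, r + d.2)))))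
    PySem.Set.empty

def legal_placement_zone_alt (all_hexes : List (Int × Int)) (is_first_move : Bool) : List (Int × Int) :=
  let occupied := PySem.Set.ofList all_hexes
  if is_first_move then
    PySem.Set.diff (pvDisk 0 0) occupied
  else
    PySem.Set.diff
      (occupied.foldl (fun zone qr => PySem.Set.update zone (pvDisk qr.1 qr.2)) PySem.Set.empty)
      occupied

-- ===== PRECONDITION & SPEC =====
def Spec_legal_placement_zone (all_hexes : List (Int × Int)) (is_first_move : Bool) (out : List (Int × Int)) : Prop := out = legal_placement_zone_alt all_hexes is_first_move
instance (all_hexes : List (Int × Int)) (is_first_move : Bool) (out : List (Int × Int)) : Decidable (Spec_legal_placement_zone all_hexes is_first_move out) := by unfold Spec_legal_placement_zone; infer_instance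

-- ===== CLAIM (what is proved, stated in full; the proofs are below) =====
def Claim_equal_legal_placement_zone : Prop := ∀ (all_hexes : List (Int × Int)) (is_first_move : Bool), Dom_legal_placement_zone all_hexes is_first_move → Spec_legal_placement_zone all_hexes is_first_move (legal_placement_zone all_hexes is_first_move)

-- ===== LEMMAS AND PROOFS =====

-- translation by a center
def pvTr (c p : Int × Int) : Int × Int := (c.1 + p.1, c.2 + p.2)

theorem pvTr_inj (c : Int × Int) : Function.Injective (pvTr c) := by
  intro a b h
  simp only [pvTr, Prod.mk.injEq] at h
  exact Prod.ext (by omega) (by omega)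

theorem add_map_tr (c : Int × Int) (s : List (Int × Int)) (x : Int × Int) :
    PySem.Set.add (s.map (pvTr c)) (pvTr c x) = (PySem.Set.add s x).map (pvTr c) := by
  rw [PySem.Set.add_eq_ite, PySem.Set.add_eq_ite]
  by_cases h : x ∈ s
  · simp [h, List.mem_map_of_injective (pvTr_inj c)]
  · simp [h, List.mem_map_of_injective (pvTr_inj c)]

-- generic: a foldl commutes with a state morphism
theorem foldl_hom' {α σ σ' : Type} (m : σ → σ') (f : σ → α → σ) (g : σ' → α → σ')
    (L : List α) (H : ∀ st x, g (m st) x = m (f st x)) :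
    ∀ st, L.foldl g (m st) = m (L.foldl f st) := by
  induction L with
  | nil => intro st; rfl
  | cons a t ih => intro st; simp only [List.foldl_cons, H]; exact ih _

def pvShift (c : Int × Int) (st : PySem.Set (Int × Int) × Int × Int) :
    PySem.Set (Int × Int) × Int × Int :=
  (st.1.map (pvTr c), c.1 + st.2.1, c.2 + st.2.2)

theorem ring_shift (q r k : Int) :
    ring q r k = (ring 0 0 k).map (pvTr (q, r)) := by
  unfold ring
  by_cases hk : k == 0
  · simp only [hk, if_pos]
    simp [PySem.Set.ofList, PySem.Set.add, PySem.Set.empty, pvTr, PySem.Set.contains]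
  · simp only [hk, if_neg, Bool.false_eq_true, not_false_eq_true]
    have inner : ∀ (dir : Int × Int) (st : PySem.Set (Int × Int) × Int × Int),
        (PySem.List.pyRange 0 k 1).foldl
          (fun st _ => (PySem.Set.add st.1 (st.2.1, st.2.2), st.2.1 + dir.1, st.2.2 + dir.2))
          (pvShift (q, r) st)
        = pvShift (q, r) ((PySem.List.pyRange 0 k 1).foldl
            (fun st _ => (PySem.Set.add st.1 (st.2.1, st.2.2), st.2.1 + dir.1, st.2.2 + dir.2)) st) := by
      intro dir st
      refine foldl_hom' (pvShift (q, r)) _ _ _ ?_ st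
      intro st x
      simp only [pvShift]
      refine Prod.ext ?_ (Prod.ext (by simp; omega) (by simp; omega))
      have : ((q, r).1 + st.2.1, (q, r).2 + st.2.2) = pvTr (q, r) (st.2.1, st.2.2) := rfl
      simp only [this, add_map_tr]
    have outer := foldl_hom' (pvShift (q, r))
      (fun (st : PySem.Set (Int × Int) × Int × Int) dir =>
        (PySem.List.pyRange 0 k 1).foldl
          (fun st _ => (PySem.Set.add st.1 (st.2.1, st.2.2), st.2.1 + dir.1, st.2.2 + dir.2)) st)
      (fun (st : PySem.Set (Int × Int) × Int × Int) dir =>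
        (PySem.List.pyRange 0 k 1).foldl
          (fun st _ => (PySem.Set.add st.1 (st.2.1, st.2.2), st.2.1 + dir.1, st.2.2 + dir.2)) st)
      HEX_DIRECTIONS (fun st dir => inner dir st)
      (PySem.Set.empty,
        (0 : Int) + (PySem.List.pyGetD HEX_DIRECTIONS 4 ((0 : Int), (0 : Int))).1 * k,
        (0 : Int) + (PySem.List.pyGetD HEX_DIRECTIONS 4 ((0 : Int), (0 : Int))).2 * k)
    have hstart : pvShift (q, r)
        (PySem.Set.empty,
          (0 : Int) + (PySem.List.pyGetD HEX_DIRECTIONS 4 ((0 : Int), (0 : Int))).1 * k,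
          (0 : Int) + (PySem.List.pyGetD HEX_DIRECTIONS 4 ((0 : Int), (0 : Int))).2 * k)
        = (PySem.Set.empty,
            q + (PySem.List.pyGetD HEX_DIRECTIONS 4 ((0 : Int), (0 : Int))).1 * k,
            r + (PySem.List.pyGetD HEX_DIRECTIONS 4 ((0 : Int), (0 : Int))).2 * k) := by
      simp [pvShift, PySem.Set.empty]
    rw [← hstart, outer]
    rfl

theorem update_map_tr (c : Int × Int) (z l : List (Int × Int)) :
    PySem.Set.update (z.map (pvTr c)) (l.map (pvTr c)) = (PySem.Set.update z l).map (pvTr c) := by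
  induction l generalizing z with
  | nil => simp [PySem.Set.update]
  | cons a t ih =>
      simp only [List.map_cons, PySem.Set.update_cons, add_map_tr]
      exact ih _

theorem neighbors_shift (q r : Int) :
    neighbors q r 8 = (neighbors 0 0 8).map (pvTr (q, r)) := by
  unfold neighbors
  have := foldl_hom' (fun (s : PySem.Set (Int × Int)) => s.map (pvTr (q, r)))
    (fun results k => PySem.Set.update results (ring 0 0 k))
    (fun results k => PySem.Set.update results (ring q r k))
    (PySem.List.pyRange 0 (8 + 1) 1)
    (by
      intro st k
      dsimp only
      rw [ring_shift q r k, update_map_tr])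
    PySem.Set.empty
  simpa [PySem.Set.empty] using this

theorem foldl_add_map_tr (c : Int × Int) (l : List (Int × Int)) :
    ∀ s : List (Int × Int),
      (l.map (pvTr c)).foldl PySem.Set.add (s.map (pvTr c))
        = (l.foldl PySem.Set.add s).map (pvTr c) := by
  induction l with
  | nil => intro s; rfl
  | cons a t ih => intro s; simp only [List.map_cons, List.foldl_cons, add_map_tr]; exact ih _

theorem ofList_map_tr (c : Int × Int) (l : List (Int × Int)) :
    PySem.Set.ofList (l.map (pvTr c)) = (PySem.Set.ofList l).map (pvTr c) := by
  rw [PySem.Set.ofList_eq_foldl, PySem.Set.ofList_eq_foldl]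
  simpa [PySem.Set.empty] using foldl_add_map_tr c l []

theorem disk_shift (q r s t : Int) :
    pvDisk q r = (pvDisk s t).map (pvTr (q - s, r - t)) := by
  unfold pvDisk
  have h := foldl_hom' (fun (z : PySem.Set (Int × Int)) => z.map (pvTr (q - s, r - t)))
    (fun cells ring =>
      PySem.Set.update cells (PySem.Set.ofList (ring.map (fun d => (s + d.1, t + d.2)))))
    (fun cells ring =>
      PySem.Set.update cells (PySem.Set.ofList (ring.map (fun d => (q + d.1, r + d.2)))))
    pvRings
    (by
      intro st ring
      dsimp only
      have hmap : ring.map (fun d => (q + d.1, r + d.2))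
          = (ring.map (fun d => (s + d.1, t + d.2))).map (pvTr (q - s, r - t)) := by
        rw [List.map_map]
        refine List.map_congr_left ?_
        intro d _
        refine Prod.ext ?_ ?_ <;> simp [pvTr] <;> omega
      rw [hmap, ofList_map_tr, update_map_tr])
    PySem.Set.empty
  have hempty : (List.map (pvTr (q - s, r - t)) PySem.Set.empty) = (PySem.Set.empty : PySem.Set (Int × Int)) := rfl
  simp only [hempty] at h
  rw [h]

set_option maxRecDepth 2000000 in
theorem disk_zero : pvDisk 0 0 = neighbors 0 0 8 := by decide

theorem disk_eq (q r : Int) : pvDisk q r = neighbors q r 8 := by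
  rw [disk_shift q r 0 0, neighbors_shift q r, disk_zero]
  have hc : pvTr (q - 0, r - 0) = pvTr (q, r) := by simp
  rw [hc]

-- ===== VERDICT (by name: the statement is the Claim_ definition above) =====
theorem legal_placement_zone_spec : Claim_equal_legal_placement_zone := by
  intro all_hexes is_first_move _
  unfold Spec_legal_placement_zone legal_placement_zone legal_placement_zone_alt
  cases is_first_move with
  | true => simp only [if_pos, disk_eq]
  | false =>
      simp only [Bool.false_eq_true, if_neg, not_false_eq_true]
      have hfun : (fun (zone : PySem.Set (Int × Int)) (qr : Int × Int) =>
            PySem.Set.update zone (neighbors qr.1 qr.2 8))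
          = fun zone qr => PySem.Set.update zone (pvDisk qr.1 qr.2) := by
        funext zone qr
        rw [disk_eq]
      rw [hfun]
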